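-- pv_equiv track=rewrite | github.com/curtistyle/Fundamentos-de-Programacion2023 | Facultad/TP8 - Matrices - Python/ejercicio5.py | menor_matriz
-- ===== SOURCE A (Python) =====
-- def menor_matriz(matriz : list, filas : int, columnas : int):
--     """Retorna la `posicion` del menor elemento de una `matriz`."""
--     pos = 0
--     aux = matriz[0][0]
--     for fila in range(0, filas):
--         for columna in range(0, columnas):
--             if (matriz[fila][columna] < aux):
--                 aux = matriz[fila][columna]
--                 pos = columna
--     return pos
-- ===== SOURCE B (Python) =====
-- def menor_matriz(matriz, filas, columnas):
--     """Retorna la `posicion` del menor elemento de una `matriz`."""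
--     cells = [matriz[f][c] for f in range(filas) for c in range(columnas)]
--     if not cells:
--         return 0
--     m = min(cells)
--     return cells.index(m) % columnas
-- ===== Notes on version B (the rewrite author's own statement) =====
-- stated objective: alternative
-- what changed: Replaces A's stateful nested scan carrying a running (pos, aux) pair by staged whole-matrix passes: flatten the scanned region into one cell list, take its global minimum, and recover the column as the minimum's first flat index modulo columnas.
import Mathlib
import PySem

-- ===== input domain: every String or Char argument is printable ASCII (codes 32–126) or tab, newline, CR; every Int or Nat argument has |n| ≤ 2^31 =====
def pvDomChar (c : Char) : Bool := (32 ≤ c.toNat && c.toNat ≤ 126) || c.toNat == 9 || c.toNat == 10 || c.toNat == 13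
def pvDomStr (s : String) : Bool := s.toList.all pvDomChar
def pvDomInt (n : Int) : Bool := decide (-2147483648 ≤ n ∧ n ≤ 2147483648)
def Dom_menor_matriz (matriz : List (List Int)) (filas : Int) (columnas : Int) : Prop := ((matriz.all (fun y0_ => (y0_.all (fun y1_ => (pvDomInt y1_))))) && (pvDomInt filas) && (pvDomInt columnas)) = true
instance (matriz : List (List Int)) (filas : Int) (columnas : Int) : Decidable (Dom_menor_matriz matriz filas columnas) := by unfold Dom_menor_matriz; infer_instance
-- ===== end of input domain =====

-- B replaces A's stateful row/column scan by staged whole-matrix passes: flatten the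
-- scanned region, take its global minimum, and recover the column as first-index mod
-- columnas (objective: alternative; same asymptotic cost).

-- ===== PORT A =====
-- literal port of A: state (pos, aux), nested fold over ranges, cells via pyGetD
def menor_matriz (matriz : List (List Int)) (filas : Int) (columnas : Int) : Int :=
  let st : Int × Int :=
    (PySem.List.pyRange 0 filas 1).foldl (fun s fila =>
      (PySem.List.pyRange 0 columnas 1).foldl (fun s columna =>
        if PySem.List.pyGetD (PySem.List.pyGetD matriz fila []) columna 0 < s.2 then
          (columna, PySem.List.pyGetD (PySem.List.pyGetD matriz fila []) columna 0)
        else s) s)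
      (0, PySem.List.pyGetD (PySem.List.pyGetD matriz 0 []) 0 0)
  st.1

-- ===== PORT B =====
-- literal port of Source B: build the flat cell list (comprehension = flatMap of a map),
-- then min, first index, and Python's % (PySem.Int.mod)
def menor_matriz_alt (matriz : List (List Int)) (filas : Int) (columnas : Int) : Int :=
  let cells : List Int :=
    (PySem.List.pyRange 0 filas 1).flatMap (fun f =>
      (PySem.List.pyRange 0 columnas 1).map (fun c =>
        PySem.List.pyGetD (PySem.List.pyGetD matriz f []) c 0))
  if cells.isEmpty then 0
  else
    let m : Int := (PySem.List.min? cells id).getD 0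
    PySem.Int.mod (((PySem.List.index? cells m).getD 0 : Nat) : Int) columnas

-- ===== PRECONDITION & SPEC =====
-- Pre_: A raises IndexError when the matrix or its first row is empty (matriz[0][0]),
-- and, when columnas > 0, when filas exceeds the row count or a scanned row has
-- fewer than columnas cells; exactly those inputs are excluded.
def Pre_menor_matriz (matriz : List (List Int)) (filas : Int) (columnas : Int) : Prop :=
  matriz ≠ [] ∧ matriz.headI ≠ [] ∧
    (0 < columnas → filas ≤ (matriz.length : Int) ∧
      ∀ row ∈ matriz.take filas.toNat, columnas ≤ (row.length : Int))
instance (matriz : List (List Int)) (filas : Int) (columnas : Int) : Decidable (Pre_menor_matriz matriz filas columnas) := by unfold Pre_menor_matriz; infer_instance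

def pvWitness_menor_matriz : List (List Int) × Int × Int := ([[3, 1], [0, 2]], 2, 2)

def Spec_menor_matriz (matriz : List (List Int)) (filas : Int) (columnas : Int) (out : Int) : Prop := out = menor_matriz_alt matriz filas columnas
instance (matriz : List (List Int)) (filas : Int) (columnas : Int) (out : Int) : Decidable (Spec_menor_matriz matriz filas columnas out) := by unfold Spec_menor_matriz; infer_instance

-- ===== CLAIM (what is proved, stated in full; the proofs are below) =====
def Claim_equal_menor_matriz : Prop := ∀ (matriz : List (List Int)) (filas : Int) (columnas : Int), Dom_menor_matriz matriz filas columnas → Pre_menor_matriz matriz filas columnas → Spec_menor_matriz matriz filas columnas (menor_matriz matriz filas columnas)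

-- ===== LEMMAS AND PROOFS =====

-- min?'s fold restarted from an accumulator `some m`
theorem pv_min?_go (l : List Int) : ∀ (m : Int),
    List.foldl (fun acc x => match acc with
        | none => some x
        | some mm => if x < mm then some x else some mm)
      (some m) l
      = some (match PySem.List.min? l id with
        | none => m
        | some mr => if mr < m then mr else m) := by
  induction l with
  | nil => intro m; simp [PySem.List.min?]
  | cons x l ih =>
    intro m
    have hcons : PySem.List.min? (x :: l) id
        = List.foldl (fun acc x => match acc with
            | none => some x
            | some mm => if x < mm then some x else some mm) (some x) l := by
      simp only [PySem.List.min?, List.foldl_cons]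
      exact PySem.List.foldl_congr_mem _ _ _ _ (fun acc x _ => by cases acc <;> rfl)
    rw [List.foldl_cons]
    by_cases hxm : x < m
    · have : (match some m with
          | none => some x
          | some mm => if x < mm then some x else some mm) = some x := by simp [hxm]
      rw [this, ih x]
      rw [show PySem.List.min? (x :: l) id
            = some (match PySem.List.min? l id with
                | none => x
                | some mr => if mr < x then mr else x) from by rw [hcons, ih x]]
      cases hml : PySem.List.min? l id with
      | none => simp; omega
      | some mr => simp only []; split_ifs <;> simp <;> omega
    · have : (match some m with
          | none => some x
          | some mm => if x < mm then some x else some mm) = some m := by simp [hxm]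
      rw [this, ih m]
      rw [show PySem.List.min? (x :: l) id
            = some (match PySem.List.min? l id with
                | none => x
                | some mr => if mr < x then mr else x) from by rw [hcons, ih x]]
      cases hml : PySem.List.min? l id with
      | none => simp; omega
      | some mr => simp only []; split_ifs <;> simp <;> omega

theorem pv_min?_cons (x : Int) (l : List Int) :
    PySem.List.min? (x :: l) id
      = some (match PySem.List.min? l id with
          | none => x
          | some mr => if mr < x then mr else x) := by
  have : PySem.List.min? (x :: l) id
      = List.foldl (fun acc x => match acc with
          | none => some x
          | some mm => if x < mm then some x else some mm) (some x) l := by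
    simp only [PySem.List.min?, List.foldl_cons]
    exact PySem.List.foldl_congr_mem _ _ _ _ (fun acc x _ => by cases acc <;> rfl)
  rw [this, pv_min?_go l x]

theorem pv_min?_eq_none (l : List Int) (h : PySem.List.min? l id = none) : l = [] := by
  cases l with
  | nil => rfl
  | cons x l => rw [pv_min?_cons] at h; exact absurd h (by simp)

-- A's scan seen abstractly: a strict-less scan over (label, value) pairs lands on the
-- label of the FIRST occurrence of the minimum value (when it beats the seed).
theorem pv_pairs (L : List (Int × Int)) : ∀ (mr : Int),
    PySem.List.min? (L.map Prod.snd) id = some mr →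
    ∀ (pos aux : Int),
    L.foldl (fun (s : Int × Int) p => if p.2 < s.2 then (p.1, p.2) else s) (pos, aux)
      = if mr < aux then ((((L.find? (fun p => p.2 == mr)).map Prod.fst).getD 0), mr)
        else (pos, aux) := by
  induction L with
  | nil => intro mr hmr; simp [PySem.List.min?] at hmr
  | cons q rest ih =>
    intro mr hmr pos aux
    obtain ⟨c, x⟩ := q
    rw [List.map_cons, pv_min?_cons] at hmr
    rw [List.foldl_cons]
    cases hrest : PySem.List.min? (rest.map Prod.snd) id with
    | none =>
      have hnil : rest = [] :=
        List.map_eq_nil_iff.1 (pv_min?_eq_none _ hrest)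
      subst hnil
      rw [hrest] at hmr
      have hx : mr = x := by simpa using hmr.symm
      subst hx
      simp [List.find?]
    | some mrr =>
      rw [hrest] at hmr
      have hmr' : mr = if mrr < x then mrr else x := by simpa using hmr.symm
      by_cases h1 : mrr < x
      · have hmrr : mr = mrr := by rw [hmr']; simp [h1]
        subst hmrr
        have hne : (x == mr) = false := by simp; omega
        by_cases h2 : x < aux
        · simp only [h2, if_true]
          rw [ih mr hrest c x]
          have hma : mr < aux := by omega
          simp [List.find?, hne, h1, hma]
        · simp only [h2, if_false]
          rw [ih mr hrest pos aux]
          simp [List.find?, hne]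
      · have hx : mr = x := by rw [hmr']; simp [h1]
        by_cases h2 : x < aux
        · simp only [h2, if_true]
          rw [ih mrr hrest c x]
          simp [List.find?, hx, h1, h2]
        · simp only [h2, if_false]
          rw [ih mrr hrest pos aux]
          have h3 : ¬ mrr < aux := by omega
          simp [hx, h3, h2]

-- A's index loop over range(0, n) reading xs[i] equals a fold over enumerate (xs.take n).
theorem pv_range_enum {α β : Type} (f : β → Int → α → β) (d : α) :
    ∀ (n : Nat) (xs : List α), n ≤ xs.length → ∀ (init : β),
    (PySem.List.pyRange 0 (n : Int) 1).foldl (fun s i => f s i (PySem.List.pyGetD xs i d)) init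
      = (PySem.List.enumerate (xs.take n) 0).foldl (fun s p => f s p.1 p.2) init := by
  intro n
  induction n with
  | zero =>
    intro xs _ init
    simp [PySem.List.pyRange_one_eq_nil (le_refl (0 : Int)), PySem.List.enumerate_nil]
  | succ n ih =>
    intro xs h init
    have hn : n < xs.length := h
    have hcast : ((n + 1 : Nat) : Int) = (n : Int) + 1 := by push_cast; ring
    rw [hcast, PySem.List.pyRange_one_succ_right (Int.natCast_nonneg n), List.foldl_append,
      ih xs (Nat.le_of_succ_le h) init]
    have htake : xs.take (n + 1) = xs.take n ++ [xs[n]] := by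
      rw [List.take_add_one]
      simp [List.getElem?_eq_getElem hn]
    rw [htake, PySem.List.enumerate_append, List.foldl_append]
    have hlen : (xs.take n).length = n := by simp [Nat.le_of_succ_le h]
    have hget : PySem.List.pyGetD xs ((n : Nat) : Int) d = xs[n] := by
      rw [PySem.List.pyGetD_natCast, List.getD_eq_getElem xs d hn]
    simp [hlen, PySem.List.enumerate_cons, PySem.List.enumerate_nil, hget]

-- the slice matriz[f][0:columnas] read cell by cell is a take
theorem pv_map_range (n : Nat) (xs : List Int) (h : n ≤ xs.length) :
    (PySem.List.pyRange 0 (n : Int) 1).map (fun c => PySem.List.pyGetD xs c 0)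
      = xs.take n := by
  induction n with
  | zero => simp [PySem.List.pyRange_one_eq_nil (le_refl (0 : Int))]
  | succ n ih =>
    have hn : n < xs.length := h
    have hcast : ((n + 1 : Nat) : Int) = (n : Int) + 1 := by push_cast; ring
    rw [hcast, PySem.List.pyRange_one_succ_right (Int.natCast_nonneg n), List.map_append,
      ih (Nat.le_of_succ_le h)]
    have hget : PySem.List.pyGetD xs ((n : Nat) : Int) 0 = xs[n] := by
      rw [PySem.List.pyGetD_natCast, List.getD_eq_getElem xs 0 hn]
    rw [List.take_add_one]
    simp [List.getElem?_eq_getElem hn, hget]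

theorem pv_foldl_flatMap {α β γ : Type} (l : List α) (g : α → List β) (f : γ → β → γ) :
    ∀ (init : γ), (l.flatMap g).foldl f init = l.foldl (fun s a => (g a).foldl f s) init := by
  induction l with
  | nil => intro init; simp
  | cons a l ih => intro init; simp [List.foldl_append, ih]

theorem pv_flatMap_congr_mem {α β : Type} (l : List α) (f g : α → List β)
    (h : ∀ a ∈ l, f a = g a) : l.flatMap f = l.flatMap g := by
  simp only [List.flatMap]
  exact congrArg List.flatten (List.map_congr_left h)

theorem pv_find_enum_none (mr : Int) : ∀ (r : List Int) (k : Int), mr ∉ r →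
    (PySem.List.enumerate r k).find? (fun p => p.2 == mr) = none := by
  intro r
  induction r with
  | nil => intro k _; simp [PySem.List.enumerate_nil]
  | cons x t ih =>
    intro k hmem
    have hx : (x == mr) = false := by
      simp only [beq_eq_false_iff_ne]
      intro h; exact hmem (h ▸ List.mem_cons_self)
    rw [PySem.List.enumerate_cons]
    simp only [List.find?, hx]
    exact ih (k + 1) (fun h => hmem (List.mem_cons_of_mem _ h))

theorem pv_find_enum (mr : Int) : ∀ (r : List Int) (k : Int), mr ∈ r →
    (PySem.List.enumerate r k).find? (fun p => p.2 == mr)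
      = some (k + (((PySem.List.index? r mr).getD 0 : Nat) : Int), mr) := by
  intro r
  induction r with
  | nil => intro k h; simp at h
  | cons x t ih =>
    intro k hmem
    rw [PySem.List.enumerate_cons]
    by_cases hx : x = mr
    · subst hx
      rw [PySem.List.index?_cons_self]
      simp [List.find?]
    · have hxb : (x == mr) = false := by simpa using hx
      have hmt : mr ∈ t := by cases hmem with
        | head => exact absurd rfl hx
        | tail _ h => exact h
      obtain ⟨j, hj⟩ := Option.isSome_iff_exists.1 ((PySem.List.index?_isSome_iff t mr).2 hmt)
      rw [PySem.List.index?_cons_of_ne t hx, hj]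
      simp only [List.find?, hxb]
      rw [ih (k + 1) hmt, hj]
      simp only [Option.getD_some, Option.map_some]
      congr 2
      push_cast
      ring

theorem pv_index?_append_of_not_mem (mr : Int) : ∀ (l t : List Int), mr ∉ l →
    PySem.List.index? (l ++ t) mr = (PySem.List.index? t mr).map (· + l.length) := by
  intro l
  induction l with
  | nil => intro t _; simp
  | cons x l ih =>
    intro t hmem
    have hx : x ≠ mr := fun h => hmem (h ▸ List.mem_cons_self)
    rw [List.cons_append, PySem.List.index?_cons_of_ne _ hx,
      ih t (fun h => hmem (List.mem_cons_of_mem _ h))]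
    cases PySem.List.index? t mr <;> simp <;> omega

theorem pv_mod_small (j C : Int) (h0 : 0 ≤ j) (h1 : j < C) : PySem.Int.mod j C = j := by
  rw [PySem.Int.mod_eq_emod_of_pos (by omega : (0:Int) < C)]
  exact Int.emod_eq_of_lt h0 h1

theorem pv_mod_add (x C : Int) (hC : 0 < C) :
    PySem.Int.mod (C + x) C = PySem.Int.mod x C := by
  rw [PySem.Int.mod_eq_emod_of_pos hC, PySem.Int.mod_eq_emod_of_pos hC]
  have h : C + x = x + C * 1 := by ring
  rw [h, Int.add_mul_emod_self_left]

-- the label of the first occurrence of mr in the flat labelled scan is the flat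
-- first index mod the (uniform) row width
theorem pv_flat_label (C : Int) (hC : 0 < C) : ∀ (rs : List (List Int)),
    (∀ r ∈ rs, (r.length : Int) = C) → ∀ (mr : Int), mr ∈ rs.flatten →
    (((rs.flatMap (fun r => PySem.List.enumerate r 0)).find? (fun p => p.2 == mr)).map
        Prod.fst).getD 0
      = PySem.Int.mod (((PySem.List.index? rs.flatten mr).getD 0 : Nat) : Int) C := by
  intro rs
  induction rs with
  | nil => intro _ mr h; simp at h
  | cons r rest ih =>
    intro hlen mr hmem
    have hrC : (r.length : Int) = C := hlen r List.mem_cons_self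
    rw [List.flatMap_cons, List.flatten_cons]
    by_cases hr : mr ∈ r
    · obtain ⟨j, hj⟩ := Option.isSome_iff_exists.1 ((PySem.List.index?_isSome_iff r mr).2 hr)
      obtain ⟨hjlt, -, -⟩ := PySem.List.getElem_of_index?_eq_some hj
      rw [List.find?_append, pv_find_enum mr r 0 hr,
        PySem.List.index?_append_of_mem _ hr, hj]
      simp only [Option.some_or, Option.getD_some, Option.map_some, zero_add]
      have hjC : (j : Int) < C := by rw [← hrC]; exact_mod_cast hjlt
      rw [pv_mod_small _ C (Int.natCast_nonneg j) hjC]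
    · rw [List.find?_append, pv_find_enum_none mr r 0 hr]
      have hrest : mr ∈ rest.flatten := by
        rcases List.mem_append.1 hmem with h | h
        · exact absurd h hr
        · exact h
      obtain ⟨j, hj⟩ := Option.isSome_iff_exists.1
        ((PySem.List.index?_isSome_iff rest.flatten mr).2 hrest)
      rw [pv_index?_append_of_not_mem mr r rest.flatten hr, hj]
      simp only [Option.none_or, Option.map_some, Option.getD_some]
      have : (((j + r.length : Nat) : Int)) = C + (j : Int) := by
        push_cast [← hrC]; ring
      rw [this, pv_mod_add _ C hC, ih (fun r h => hlen r (List.mem_cons_of_mem _ h)) mr hrest,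
        hj]
      simp

-- ===== VERDICT (by name: the statement is the Claim_ definition above) =====
theorem menor_matriz_spec : Claim_equal_menor_matriz := by
  intro matriz filas columnas _ hpre
  unfold Spec_menor_matriz menor_matriz menor_matriz_alt
  by_cases hc : 0 < columnas
  swap
  · -- columnas <= 0: nothing is scanned on either side
    have hnil : PySem.List.pyRange 0 columnas 1 = [] :=
      PySem.List.pyRange_one_eq_nil (by omega)
    simp [hnil, List.foldl_fixed]
  by_cases hf : 0 < filas
  swap
  · -- filas <= 0: nothing is scanned on either side
    have hnil : PySem.List.pyRange 0 filas 1 = [] :=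
      PySem.List.pyRange_one_eq_nil (by omega)
    simp [hnil]
  obtain ⟨hm0, hh0, h3⟩ := hpre
  obtain ⟨hfil, hrows⟩ := h3 hc
  -- every scanned row is long enough
  have hrowlen : ∀ f : Int, f ∈ PySem.List.pyRange 0 filas 1 →
      columnas ≤ ((PySem.List.pyGetD matriz f []).length : Int) := by
    intro f hf'
    obtain ⟨h0f, h1f⟩ := (PySem.List.mem_pyRange_one).1 hf'
    have hlt : f < (matriz.length : Int) := lt_of_lt_of_le h1f hfil
    rw [PySem.List.pyGetD_eq_getElem matriz [] h0f hlt]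
    apply hrows
    have hlt' : f.toNat < filas.toNat := by omega
    have hmm : matriz[f.toNat] = (matriz.take filas.toNat)[f.toNat]'(by
        simp [List.length_take]; omega) := by
      rw [List.getElem_take]
    rw [hmm]
    exact List.getElem_mem _
  -- the scanned region, row by row
  set rows : List (List Int) :=
    (PySem.List.pyRange 0 filas 1).map
      (fun f => (PySem.List.pyGetD matriz f []).take columnas.toNat) with hrowsdef
  have hrowsC : ∀ r ∈ rows, (r.length : Int) = columnas := by
    intro r hr
    rw [hrowsdef] at hr
    obtain ⟨f, hf', rfl⟩ := List.mem_map.1 hr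
    have := hrowlen f hf'
    simp [List.length_take]
    omega
  -- B's cell list is the flattened region
  have hcells :
      (PySem.List.pyRange 0 filas 1).flatMap (fun f =>
        (PySem.List.pyRange 0 columnas 1).map (fun c =>
          PySem.List.pyGetD (PySem.List.pyGetD matriz f []) c 0))
      = rows.flatten := by
    have h1 : rows.flatten = rows.flatMap id := by simp [List.flatMap_id]
    rw [h1, hrowsdef, List.flatMap_map]
    apply pv_flatMap_congr_mem
    intro f hf'
    have hlen : columnas.toNat ≤ (PySem.List.pyGetD matriz f []).length := by
      have := hrowlen f hf'; omega
    have hcast : columnas = ((columnas.toNat : Nat) : Int) := by omega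
    rw [hcast, pv_map_range _ _ hlen]
    rfl
  -- A's nested loop is the labelled flat scan
  have hA : ∀ init : Int × Int,
      (PySem.List.pyRange 0 filas 1).foldl (fun s fila =>
        (PySem.List.pyRange 0 columnas 1).foldl (fun s columna =>
          if PySem.List.pyGetD (PySem.List.pyGetD matriz fila []) columna 0 < s.2 then
            (columna, PySem.List.pyGetD (PySem.List.pyGetD matriz fila []) columna 0)
          else s) s) init
      = (rows.flatMap (fun r => PySem.List.enumerate r 0)).foldl
          (fun (s : Int × Int) p => if p.2 < s.2 then (p.1, p.2) else s) init := by
    intro init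
    rw [pv_foldl_flatMap, hrowsdef, List.foldl_map]
    apply PySem.List.foldl_congr_mem
    intro s f hf'
    have hlen : columnas.toNat ≤ (PySem.List.pyGetD matriz f []).length := by
      have := hrowlen f hf'; omega
    have hcast : columnas = ((columnas.toNat : Nat) : Int) := by omega
    rw [hcast, pv_range_enum (fun (s : Int × Int) i v => if v < s.2 then (i, v) else s) 0
      columnas.toNat _ hlen s]
    rw [Int.toNat_natCast]
  -- the head cell is A's seed
  have h0mem : (0 : Int) ∈ PySem.List.pyRange 0 filas 1 := by
    rw [PySem.List.mem_pyRange_one]; omega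
  have hlen0 : columnas ≤ ((PySem.List.pyGetD matriz 0 []).length : Int) := hrowlen 0 h0mem
  obtain ⟨a, r0t, hr0eq⟩ : ∃ a t, PySem.List.pyGetD matriz 0 [] = a :: t := by
    cases hr0' : PySem.List.pyGetD matriz 0 [] with
    | nil => rw [hr0'] at hlen0; simp at hlen0; omega
    | cons a t => exact ⟨a, t, rfl⟩
  have ha : PySem.List.pyGetD (PySem.List.pyGetD matriz 0 []) 0 0 = a := by
    rw [hr0eq, PySem.List.pyGetD_eq_getElem (a :: r0t) 0 (le_refl 0) (by simp)]
    simp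
  obtain ⟨m, hm⟩ : ∃ m : Nat, columnas.toNat = m + 1 := ⟨columnas.toNat - 1, by omega⟩
  have hrange : PySem.List.pyRange 0 filas 1 = 0 :: PySem.List.pyRange 1 filas 1 := by
    have := PySem.List.pyRange_one_cons (a := 0) (b := filas) hf
    simpa using this
  have hrows0 : rows = (a :: r0t.take m) :: (PySem.List.pyRange 1 filas 1).map
      (fun f => (PySem.List.pyGetD matriz f []).take columnas.toNat) := by
    rw [hrowsdef, hrange, List.map_cons, hr0eq, hm, List.take_succ_cons]
  -- the flat cell list, exposed as a cons
  obtain ⟨tl, htl⟩ : ∃ tl, rows.flatten = a :: tl := by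
    rw [hrows0, List.flatten_cons, List.cons_append]
    exact ⟨_, rfl⟩
  -- the global minimum of the scanned cells
  obtain ⟨mr, hmr⟩ : ∃ mr, PySem.List.min? rows.flatten id = some mr := by
    rw [htl, pv_min?_cons]; exact ⟨_, rfl⟩
  have hma : mr ≤ a := by
    rw [htl, pv_min?_cons] at hmr
    cases h : PySem.List.min? tl id with
    | none => rw [h] at hmr; simp at hmr; omega
    | some mt => rw [h] at hmr; simp at hmr; split_ifs at hmr <;> omega
  -- values of the labelled scan = the cells
  have hsnd : ((rows.flatMap (fun r => PySem.List.enumerate r 0)).map Prod.snd)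
      = rows.flatten := by
    rw [List.map_flatMap]
    have h1 : rows.flatMap (fun r => (PySem.List.enumerate r 0).map Prod.snd)
        = rows.flatMap (fun r => r) := by
      apply pv_flatMap_congr_mem
      intro r _
      exact PySem.List.map_snd_enumerate r 0
    rw [h1]
    simp
  have hmrL : PySem.List.min?
      ((rows.flatMap (fun r => PySem.List.enumerate r 0)).map Prod.snd) id = some mr := by
    rw [hsnd]; exact hmr
  -- assemble
  have hmr' : PySem.List.min? (a :: tl) id = some mr := by rw [← htl]; exact hmr
  simp only [hcells, hA, ha, htl, List.isEmpty_cons, Bool.false_eq_true,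
    if_false, hmr', Option.getD_some]
  rw [← htl, pv_pairs _ mr hmrL 0 a]
  by_cases hlt : mr < a
  · simp only [hlt, if_true]
    exact pv_flat_label columnas hc rows hrowsC mr (PySem.List.min?_mem hmr)
  · simp only [hlt, if_false]
    have hmra : mr = a := by omega
    rw [htl, hmra, PySem.List.index?_cons_self]
    simp only [Option.getD_some, Nat.cast_zero]
    exact (pv_mod_small 0 columnas (le_refl 0) hc).symm
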